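-- pv_equiv track=rewrite | github.com/yezhiyi9670/hackergame-2024-personal-writeup | part-2/powerful-regex/problem2.py | common_prefix_suffix_len
-- ===== SOURCE A (Python) =====
-- def common_prefix_suffix_len(items: list[str]):
--     prefix_len = 0
--     suffix_len = 0
--     k = 0
--     for i in range(0, min(map(len, items))):
--         if items[0][i] == '(': k += 1
--         if items[0][i] == ')': k -= 1
--         if len(set(map(lambda s: s[i], items))) <= 1:
--             if k == 0: prefix_len = i + 1
--         else:
--             break
--     k = 0
--     for i in range(1, min(map(len, items)) + 1):
--         if items[0][-i] == '(': k += 1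
--         if items[0][-i] == ')': k -= 1
--         if len(set(map(lambda s: s[-i], items))) <= 1:
--             if k == 0: suffix_len = i
--         else:
--             break
--     return prefix_len, suffix_len
-- ===== SOURCE B (Python) =====
-- def common_prefix_suffix_len(items: list[str]):
--     # Pairwise reduction: fold the list with a two-string longest-common-prefix
--     # function, then do one balance scan over the resulting common string.
--     def lcp2(a, b):
--         n = min(len(a), len(b))
--         i = 0
--         while i < n and a[i] == b[i]:
--             i += 1
--         return a[:i]
--
--     def balanced_len(t):
--         bal = 0
--         best = 0
--         for i, c in enumerate(t):
--             if c == '(':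
--                 bal += 1
--             elif c == ')':
--                 bal -= 1
--             if bal == 0:
--                 best = i + 1
--         return best
--
--     common = items[0]
--     for s in items[1:]:
--         common = lcp2(common, s)
--     rev = [s[::-1] for s in items]
--     common_r = rev[0]
--     for s in rev[1:]:
--         common_r = lcp2(common_r, s)
--     return balanced_len(common), balanced_len(common_r)
-- ===== Notes on version B (the rewrite author's own statement) =====
-- stated objective: alternative
-- what changed: A makes one interleaved column-wise loop per direction (per-column set() equality test, running paren balance, early break); B instead folds the list with a two-string longest-common-prefix function to materialise the actual common prefix string (and, on the reversed strings, the common suffix), then runs a standalone balance scan over each resulting string.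
import Mathlib
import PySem

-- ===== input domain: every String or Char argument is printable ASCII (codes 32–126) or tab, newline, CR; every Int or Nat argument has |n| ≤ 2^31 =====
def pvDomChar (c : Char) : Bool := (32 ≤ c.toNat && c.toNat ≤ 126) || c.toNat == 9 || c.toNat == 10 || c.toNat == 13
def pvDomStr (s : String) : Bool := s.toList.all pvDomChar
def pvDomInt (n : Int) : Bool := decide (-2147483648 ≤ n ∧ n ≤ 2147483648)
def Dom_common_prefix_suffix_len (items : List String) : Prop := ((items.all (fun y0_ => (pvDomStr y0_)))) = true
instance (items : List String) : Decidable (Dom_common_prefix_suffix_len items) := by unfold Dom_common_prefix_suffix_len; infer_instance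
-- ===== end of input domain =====

-- B replaces A's interleaved column-wise loops (per-column set() test + running balance + break) by a
-- pairwise longest-common-prefix fold that materialises the common prefix string (and, on the reversed
-- strings, the common suffix), followed by a standalone balance scan over that string.

-- ===== PORT A =====
-- prefix loop of A over indices i: items[0][i] (0 ≤ i < min length, so getD is exact Python indexing)
def aLoopPre (lists : List (List Char)) : List Nat → Int → Int → Int
  | [], _, pl => pl
  | i :: rest, k, pl =>
    let c := (lists.headI).getD i ' '
    let k := k + (if c = '(' then 1 else 0)
    let k := k - (if c = ')' then 1 else 0)
    if (PySem.Set.ofList (lists.map (fun s => s.getD i ' '))).length ≤ 1 then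
      aLoopPre lists rest k (if k = 0 then (i : Int) + 1 else pl)
    else pl

-- suffix loop of A over i = 1 .. m: s[-i] = s[len(s) - i] (exact Python negative indexing for 1 ≤ i ≤ min length)
def aLoopSuf (lists : List (List Char)) : List Nat → Int → Int → Int
  | [], _, sl => sl
  | i :: rest, k, sl =>
    let c := (lists.headI).getD ((lists.headI).length - i) ' '
    let k := k + (if c = '(' then 1 else 0)
    let k := k - (if c = ')' then 1 else 0)
    if (PySem.Set.ofList (lists.map (fun s => s.getD (s.length - i) ' '))).length ≤ 1 then
      aLoopSuf lists rest k (if k = 0 then (i : Int) else sl)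
    else sl

def common_prefix_suffix_len (items : List String) : Int × Int :=
  -- min(map(len, items)): Python min raises ValueError on []; that case is excluded by Pre_
  match ((items.map (fun s => s.toList.length)).min?) with
  | none => (0, 0)
  | some m =>
    let lists := items.map String.toList
    (aLoopPre lists (List.range m) 0 0, aLoopSuf lists (List.range' 1 m) 0 0)

-- ===== PORT B =====
-- lcp2's while loop: number of leading positions where the two strings agree
def lcpLen : List Char → List Char → Nat
  | a :: as, b :: bs => if a = b then lcpLen as bs + 1 else 0
  | _, _ => 0

-- lcp2: a[:i] for the i computed by the while loop
def lcp2 (a b : List Char) : List Char := a.take (lcpLen a b)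

-- balanced_len's enumerate loop: running balance, remember the last index with balance 0
def balScan : List Char → Nat → Int → Int → Int
  | [], _, _, best => best
  | c :: t, i, bal, best =>
    let bal := if c = '(' then bal + 1 else if c = ')' then bal - 1 else bal
    balScan t (i + 1) bal (if bal = 0 then (i : Int) + 1 else best)

def common_prefix_suffix_len_alt (items : List String) : Int × Int :=
  -- items[0] raises IndexError on []; that case is excluded by Pre_
  let lists := items.map String.toList
  let common := lists.tail.foldl lcp2 lists.headI
  let rev := lists.map List.reverse            -- s[::-1] is List.reverse
  let common_r := rev.tail.foldl lcp2 rev.headI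
  (balScan common 0 0 0, balScan common_r 0 0 0)

-- ===== PRECONDITION & SPEC =====
-- Pre_ excludes only the empty list, on which both A and B raise (ValueError from min / IndexError from items[0]).
def Pre_common_prefix_suffix_len (items : List String) : Prop := items ≠ []
instance (items : List String) : Decidable (Pre_common_prefix_suffix_len items) := by unfold Pre_common_prefix_suffix_len; infer_instance
def pvWitness_common_prefix_suffix_len : List String := ["(a)", "(b)"]

def Spec_common_prefix_suffix_len (items : List String) (out : Int × Int) : Prop := out = common_prefix_suffix_len_alt items
instance (items : List String) (out : Int × Int) : Decidable (Spec_common_prefix_suffix_len items out) := by unfold Spec_common_prefix_suffix_len; infer_instance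

-- ===== CLAIM (what is proved, stated in full; the proofs are below) =====
def Claim_equal_common_prefix_suffix_len : Prop := ∀ (items : List String), Dom_common_prefix_suffix_len items → Pre_common_prefix_suffix_len items → Spec_common_prefix_suffix_len items (common_prefix_suffix_len items)

-- ===== LEMMAS AND PROOFS =====

-- proof-only helper: A's loop, restricted to the surviving indices, as a balance scan over an index list
def bScanIdx (first : List Char) : List Nat → Int → Int → Int
  | [], _, best => best
  | i :: rest, k, best =>
    let c := first.getD i ' '
    let k := if c = '(' then k + 1 else if c = ')' then k - 1 else k
    bScanIdx first rest k (if k = 0 then (i : Int) + 1 else best)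

-- a list of length ≤ 1 has at most one distinct member
theorem len_le_one_mem_eq {α : Type} {l : List α} (h : l.length ≤ 1) {a b : α}
    (ha : a ∈ l) (hb : b ∈ l) : a = b := by
  match l with
  | [] => cases ha
  | [x] => simp_all
  | x :: y :: t => simp at h

-- set(c :: ys) has length ≤ 1 iff every element of ys equals c
theorem set_len_le_one_iff (c : Char) (ys : List Char) :
    (PySem.Set.ofList (c :: ys)).length ≤ 1 ↔ ∀ y ∈ ys, y = c := by
  constructor
  · intro h y hy
    exact len_le_one_mem_eq h (by simp [PySem.Set.mem_ofList, hy]) (by simp [PySem.Set.mem_ofList])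
  · intro h
    have hfold : ∀ (zs : List Char), (∀ y ∈ zs, y = c) → zs.foldl PySem.Set.add [c] = [c] := by
      intro zs
      induction zs with
      | nil => intro _; rfl
      | cons z t ih =>
        intro hz
        have hzc : z = c := hz z (by simp)
        have hadd : PySem.Set.add [c] z = [c] := by
          simp [PySem.Set.add, PySem.Set.contains, hzc]
        simp only [List.foldl_cons, hadd]
        exact ih (fun y hy => hz y (by simp [hy]))
    have hset : PySem.Set.ofList (c :: ys) = [c] := by
      rw [PySem.Set.ofList_eq_foldl]
      simpa using hfold ys h
    simp [hset]

-- A's column-equality test (via set) equals an any-mismatch test, for any column extractor f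
theorem cond_eq (x : List Char) (xs : List (List Char)) (f : List Char → Char) :
    (decide ((PySem.Set.ofList ((x :: xs).map f)).length ≤ 1))
      = !(xs.any (fun s => f s ≠ f x)) := by
  simp only [List.map_cons]
  rw [Bool.eq_iff_iff, decide_eq_true_iff, Bool.not_eq_true', List.any_eq_false, set_len_le_one_iff]
  constructor
  · intro h s hs
    simpa using h (f s) (List.mem_map_of_mem hs)
  · intro h y hy
    obtain ⟨s, hs, rfl⟩ := List.mem_map.mp hy
    simpa using h s hs

-- arithmetic form of the balance update: A's two ifs equal the if-elif chain
theorem kupd_eq (c : Char) (k : Int) :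
    k + (if c = '(' then 1 else 0) - (if c = ')' then 1 else 0)
      = (if c = '(' then k + 1 else if c = ')' then k - 1 else k) := by
  by_cases h1 : c = '('
  · simp [h1]
  · by_cases h2 : c = ')' <;> simp [h1, h2]

-- any over a list with predicates equal on its members
theorem anyCongrMem {α : Type} {l : List α} {p q : α → Bool}
    (h : ∀ a ∈ l, p a = q a) : l.any p = l.any q := by
  induction l with
  | nil => rfl
  | cons a t ih =>
    simp only [List.any_cons, h a (by simp), ih (fun b hb => h b (by simp [hb]))]

-- PREFIX: A's interleaved loop equals a balance scan over the columns on which all strings agree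
theorem aLoopPre_eq_bScanIdx (x : List Char) (xs : List (List Char)) :
    ∀ (l : List Nat) (k pl : Int),
      aLoopPre (x :: xs) l k pl
        = bScanIdx x (l.takeWhile (fun i => !(xs.any (fun s => s.getD i ' ' ≠ x.getD i ' ')))) k pl := by
  intro l
  induction l with
  | nil => intro k pl; rfl
  | cons i rest ih =>
    intro k pl
    have hc := cond_eq x xs (fun s => s.getD i ' ')
    simp only [aLoopPre, List.takeWhile_cons]
    by_cases hb : (xs.any (fun s => decide (s.getD i ' ' ≠ x.getD i ' '))) = true
    · rw [hb] at hc
      simp only [Bool.not_true, decide_eq_false_iff_not] at hc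
      rw [if_neg hc, hb]
      rfl
    · rw [Bool.not_eq_true] at hb
      rw [hb] at hc
      simp only [Bool.not_false, decide_eq_true_eq] at hc
      rw [if_pos hc, hb]
      simp only [Bool.not_false, if_true]
      rw [bScanIdx]
      generalize hA : ((k + if (x :: xs).headI.getD i ' ' = '(' then (1 : Int) else 0)
          - if (x :: xs).headI.getD i ' ' = ')' then 1 else 0) = kA
      rw [kupd_eq ((x :: xs).headI.getD i ' ') k] at hA
      subst hA
      exact ih _ _

-- any prefix of range m is a range itself
theorem prefix_range_eq (m : Nat) (l : List Nat) (h : l <+: List.range m) : l = List.range l.length := by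
  apply List.ext_getElem (by simp)
  intro i h1 h2
  rw [h.getElem h1]
  simp

-- getD on a reverse
theorem revGetD (s : List Char) (i : Nat) (h : i < s.length) :
    s.reverse.getD i ' ' = s.getD (s.length - 1 - i) ' ' := by
  have h1 : i < s.reverse.length := by simpa using h
  have h2 : s.length - 1 - i < s.length := by omega
  rw [List.getD_eq_getElem _ _ h1, List.getD_eq_getElem _ _ h2, List.getElem_reverse]

-- SUFFIX: A's loop over 1..m (negative indexing) equals the balance scan over the reversed strings
theorem aLoopSuf_eq_bScanIdx (x : List Char) (xs : List (List Char)) (m : Nat)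
    (hx : m ≤ x.length) (hxs : ∀ s ∈ xs, m ≤ s.length) :
    ∀ (l : List Nat), (∀ i ∈ l, i < m) → ∀ (k sl : Int),
      aLoopSuf (x :: xs) (l.map (· + 1)) k sl
        = bScanIdx x.reverse
            (l.takeWhile (fun i => !((xs.map List.reverse).any
              (fun s => s.getD i ' ' ≠ x.reverse.getD i ' ')))) k sl := by
  intro l
  induction l with
  | nil => intro _ k sl; rfl
  | cons i rest ih =>
    intro hlt k sl
    have him : i < m := hlt i (by simp)
    have hchar : ∀ s : List Char, m ≤ s.length →
        s.getD (s.length - (i + 1)) ' ' = s.reverse.getD i ' ' := by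
      intro s hs
      rw [revGetD s i (by omega)]
      congr 1
      omega
    have hptwise : ∀ s ∈ xs,
        (decide (s.getD (s.length - (i + 1)) ' ' ≠ x.getD (x.length - (i + 1)) ' '))
          = decide (s.reverse.getD i ' ' ≠ x.reverse.getD i ' ') := by
      intro s hs
      rw [hchar s (hxs s hs), hchar x hx]
    have hanyeq : (xs.any (fun s => decide (s.getD (s.length - (i + 1)) ' ' ≠ x.getD (x.length - (i + 1)) ' ')))
        = ((xs.map List.reverse).any (fun s => decide (s.getD i ' ' ≠ x.reverse.getD i ' '))) := by
      rw [List.any_map]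
      exact anyCongrMem (fun s hs => hptwise s hs)
    have hc := cond_eq x xs (fun s => s.getD (s.length - (i + 1)) ' ')
    rw [hanyeq] at hc
    rw [List.map_cons]
    simp only [aLoopSuf, List.takeWhile_cons]
    rw [hchar ((x :: xs).headI) hx]
    by_cases hb : ((xs.map List.reverse).any (fun s => decide (s.getD i ' ' ≠ x.reverse.getD i ' '))) = true
    · rw [hb] at hc
      simp only [Bool.not_true, decide_eq_false_iff_not] at hc
      rw [if_neg hc, hb]
      rfl
    · rw [Bool.not_eq_true] at hb
      rw [hb] at hc
      simp only [Bool.not_false, decide_eq_true_eq] at hc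
      rw [if_pos hc, hb]
      simp only [Bool.not_false, if_true]
      rw [bScanIdx]
      generalize hA : ((k + if (x :: xs).headI.reverse.getD i ' ' = '(' then (1 : Int) else 0)
          - if (x :: xs).headI.reverse.getD i ' ' = ')' then 1 else 0) = kA
      rw [kupd_eq ((x :: xs).headI.reverse.getD i ' ') k] at hA
      subst hA
      exact ih (fun j hj => hlt j (by simp [hj])) _ _

-- B's balance scan over a prefix of x equals the index scan over the same positions
theorem balScan_eq_bScanIdx (x : List Char) :
    ∀ (t : List Char) (i : Nat) (k best : Int),
      (∀ j (hj : j < t.length), t[j] = x.getD (i + j) ' ') →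
      balScan t i k best = bScanIdx x (List.range' i t.length) k best := by
  intro t
  induction t with
  | nil => intro i k best _; rfl
  | cons c t ih =>
    intro i k best h
    have hc : c = x.getD i ' ' := by simpa using h 0 (by simp)
    rw [List.length_cons, List.range'_succ]
    simp only [balScan, bScanIdx, ← hc]
    exact ih (i + 1) _ _ (fun j hj => by
      have := h (j + 1) (by simpa using Nat.succ_lt_succ hj)
      simpa [Nat.add_assoc, Nat.add_comm 1 j] using this)

-- lcpLen basics
theorem lcpLen_le_right : ∀ (a b : List Char), lcpLen a b ≤ b.length := by
  intro a
  induction a with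
  | nil => intro b; cases b <;> simp [lcpLen]
  | cons c as ih =>
    intro b
    cases b with
    | nil => simp [lcpLen]
    | cons d bs =>
      by_cases h : c = d
      · simp only [lcpLen, if_pos h, List.length_cons]
        exact Nat.succ_le_succ (ih bs)
      · simp [lcpLen, h]

theorem lcpLen_agree : ∀ (a b : List Char) (i : Nat), i < lcpLen a b →
    a.getD i ' ' = b.getD i ' ' := by
  intro a
  induction a with
  | nil => intro b i h; cases b <;> simp [lcpLen] at h
  | cons c as ih =>
    intro b i h
    cases b with
    | nil => simp [lcpLen] at h
    | cons d bs =>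
      simp only [lcpLen] at h
      split at h
      · cases i with
        | zero => simpa using ‹c = d›
        | succ j => simpa using ih bs j (by omega)
      · omega

theorem lcpLen_boundary : ∀ (a b : List Char), lcpLen a b < a.length → lcpLen a b < b.length →
    a.getD (lcpLen a b) ' ' ≠ b.getD (lcpLen a b) ' ' := by
  intro a
  induction a with
  | nil => intro b h _; simp at h
  | cons c as ih =>
    intro b ha hb
    cases b with
    | nil => simp at hb
    | cons d bs =>
      by_cases h : c = d
      · simp only [lcpLen, if_pos h] at ha hb ⊢
        simpa using ih bs (by simpa using ha) (by simpa using hb)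
      · simp only [lcpLen, if_neg h] at ha hb ⊢
        simpa using h

theorem lcpLen_take_left : ∀ (q : Nat) (a b : List Char), lcpLen (a.take q) b = min q (lcpLen a b) := by
  intro q
  induction q with
  | zero => intro a b; cases b <;> simp [lcpLen]
  | succ n ih =>
    intro a b
    cases a with
    | nil => cases b <;> simp [lcpLen]
    | cons c as =>
      cases b with
      | nil => simp [lcpLen]
      | cons d bs =>
        simp only [List.take_succ_cons, lcpLen]
        split
        · rw [ih as bs]; omega
        · omega

-- B's fold of lcp2 computes a take of the head by the running minimum of pairwise lcp lengths
theorem foldl_lcp2_take (x : List Char) :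
    ∀ (xs : List (List Char)) (q : Nat),
      xs.foldl lcp2 (x.take q) = x.take (xs.foldl (fun q s => min q (lcpLen x s)) q) := by
  intro xs
  induction xs with
  | nil => intro q; rfl
  | cons s xs ih =>
    intro q
    have hstep : lcp2 (x.take q) s = x.take (min q (lcpLen x s)) := by
      rw [lcp2, lcpLen_take_left, List.take_take]
      congr 1
      omega
    simp only [List.foldl_cons, hstep, ih]

-- running-minimum fold facts
theorem foldl_min_le_init {α : Type} (f : α → Nat) :
    ∀ (xs : List α) (q : Nat), xs.foldl (fun q s => min q (f s)) q ≤ q := by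
  intro xs
  induction xs with
  | nil => intro q; simp
  | cons s xs ih =>
    intro q
    simp only [List.foldl_cons]
    exact le_trans (ih _) (by omega)

theorem foldl_min_le_mem {α : Type} (f : α → Nat) :
    ∀ (xs : List α) (q : Nat) (s : α), s ∈ xs → xs.foldl (fun q s => min q (f s)) q ≤ f s := by
  intro xs
  induction xs with
  | nil => intro q s h; cases h
  | cons t xs ih =>
    intro q s h
    simp only [List.foldl_cons]
    rcases List.mem_cons.mp h with rfl | h
    · exact le_trans (foldl_min_le_init f xs _) (by omega)
    · exact ih _ s h

theorem foldl_min_achieved {α : Type} (f : α → Nat) :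
    ∀ (xs : List α) (q : Nat),
      xs.foldl (fun q s => min q (f s)) q = q ∨ ∃ s ∈ xs, xs.foldl (fun q s => min q (f s)) q = f s := by
  intro xs
  induction xs with
  | nil => intro q; left; rfl
  | cons t xs ih =>
    intro q
    simp only [List.foldl_cons]
    rcases ih (min q (f t)) with h | ⟨s, hs, h⟩
    · by_cases hq : q ≤ f t
      · left; rw [h]; omega
      · right; exact ⟨t, by simp, by rw [h]; omega⟩
    · right; exact ⟨s, by simp [hs], h⟩

-- the "common column prefix" predicate: p columns agree and fit in every string
def goodCol (x : List Char) (xs : List (List Char)) (p : Nat) : Prop :=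
  p ≤ x.length ∧ ∀ s ∈ xs, p ≤ s.length ∧ ∀ i < p, s.getD i ' ' = x.getD i ' '

theorem goodCol_mono {x : List Char} {xs : List (List Char)} {p q : Nat}
    (hpq : q ≤ p) (h : goodCol x xs p) : goodCol x xs q := by
  obtain ⟨h1, h2⟩ := h
  exact ⟨le_trans hpq h1, fun s hs => ⟨le_trans hpq (h2 s hs).1, fun i hi => (h2 s hs).2 i (by omega)⟩⟩

theorem goodCol_max_unique {x : List Char} {xs : List (List Char)} {p q : Nat}
    (hp : goodCol x xs p) (hp1 : ¬ goodCol x xs (p + 1))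
    (hq : goodCol x xs q) (hq1 : ¬ goodCol x xs (q + 1)) : p = q := by
  by_contra hne
  rcases Nat.lt_or_ge p q with h | h
  · exact hp1 (goodCol_mono (by omega) hq)
  · exact hq1 (goodCol_mono (by omega) hp)

-- the element just past a takeWhile fails the predicate
theorem takeWhile_stop {α : Type} (p : α → Bool) :
    ∀ (l : List α) (a : α), l[(l.takeWhile p).length]? = some a → p a = false := by
  intro l
  induction l with
  | nil => intro a h; simp at h
  | cons c t ih =>
    intro a h
    by_cases hp : p c = true
    · rw [List.takeWhile_cons, if_pos hp, List.length_cons, List.getElem?_cons_succ] at h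
      exact ih a h
    · rw [Bool.not_eq_true] at hp
      rw [List.takeWhile_cons, if_neg (by rw [hp]; simp), List.length_nil,
        List.getElem?_cons_zero, Option.some_inj] at h
      rw [← h]; exact hp

-- A's surviving-column count is a maximal goodCol
theorem takeWhile_good (x : List Char) (xs : List (List Char)) (m : Nat)
    (hm : ((x :: xs).map (·.length)).min? = some m) :
    goodCol x xs (((List.range m).takeWhile
        (fun i => !(xs.any (fun s => s.getD i ' ' ≠ x.getD i ' ')))).length)
    ∧ ¬ goodCol x xs (((List.range m).takeWhile
        (fun i => !(xs.any (fun s => s.getD i ' ' ≠ x.getD i ' ')))).length + 1) := by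
  obtain ⟨hmem, hle⟩ := List.min?_eq_some_iff.mp hm
  have hxlen : m ≤ x.length := hle _ (by simp)
  have hslen : ∀ s ∈ xs, m ≤ s.length := fun s hs => hle _ (List.mem_map.mpr ⟨s, by simp [hs]⟩)
  set pred := (fun i => !(xs.any (fun s => s.getD i ' ' ≠ x.getD i ' '))) with hpred
  set pA := ((List.range m).takeWhile pred).length with hpA
  have hpAm : pA ≤ m := by
    have := (List.takeWhile_prefix (p := pred) (l := List.range m)).length_le
    simpa using this
  have hsat : ∀ i < pA, pred i = true := by
    intro i hi
    have heq : (List.range m).takeWhile pred = List.range pA :=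
      prefix_range_eq m _ (List.takeWhile_prefix _)
    have : i ∈ (List.range m).takeWhile pred := by rw [heq]; exact List.mem_range.mpr hi
    exact List.mem_takeWhile_imp this
  constructor
  · refine ⟨by omega, fun s hs => ⟨by have := hslen s hs; omega, fun i hi => ?_⟩⟩
    have := hsat i hi
    simp only [hpred, Bool.not_eq_true', List.any_eq_false] at this
    simpa using this s hs
  · intro hgood
    rcases Nat.lt_or_ge pA m with hlt | hge
    · have hsome : (List.range m)[((List.range m).takeWhile pred).length]? = some pA := by
        rw [← hpA, List.getElem?_range hlt]
      have hstop := takeWhile_stop pred (List.range m) pA hsome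
      simp only [hpred, Bool.not_eq_false', List.any_eq_true] at hstop
      obtain ⟨s, hs, hne⟩ := hstop
      have := (hgood.2 s hs).2 pA (by omega)
      simp at hne
      exact hne this
    · have hpAeq : pA = m := by omega
      obtain ⟨y, hy, hylen⟩ := List.mem_map.mp hmem
      rcases List.mem_cons.mp hy with rfl | hy
      · have := hgood.1; omega
      · have := (hgood.2 y hy).1; omega

-- B's running-minimum is a maximal goodCol
theorem foldMin_good (x : List Char) (xs : List (List Char)) :
    goodCol x xs (xs.foldl (fun q s => min q (lcpLen x s)) x.length)
    ∧ ¬ goodCol x xs (xs.foldl (fun q s => min q (lcpLen x s)) x.length + 1) := by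
  set Q := xs.foldl (fun q s => min q (lcpLen x s)) x.length with hQ
  constructor
  · refine ⟨foldl_min_le_init _ xs _, fun s hs => ?_⟩
    have hQs : Q ≤ lcpLen x s := foldl_min_le_mem _ xs _ s hs
    exact ⟨le_trans hQs (lcpLen_le_right x s),
      fun i hi => (lcpLen_agree x s i (by omega)).symm⟩
  · intro hgood
    rcases foldl_min_achieved (lcpLen x) xs x.length with h | ⟨s, hs, h⟩
    · have := hgood.1; omega
    · have hQs : Q < lcpLen x s + 1 := by omega
      have h1 : lcpLen x s < x.length := by have := hgood.1; omega
      have h2 : lcpLen x s < s.length := by have := (hgood.2 s hs).1; omega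
      exact lcpLen_boundary x s h1 h2 ((hgood.2 s hs).2 (lcpLen x s) (by omega)).symm

-- one direction: A's surviving-column scan equals B's scan over the folded common prefix
theorem half_eq (x : List Char) (xs : List (List Char)) (m : Nat)
    (hm : ((x :: xs).map (·.length)).min? = some m) :
    bScanIdx x ((List.range m).takeWhile
        (fun i => !(xs.any (fun s => s.getD i ' ' ≠ x.getD i ' ')))) 0 0
      = balScan (xs.foldl lcp2 x) 0 0 0 := by
  set pred := (fun i => !(xs.any (fun s => s.getD i ' ' ≠ x.getD i ' '))) with hpred
  set pA := ((List.range m).takeWhile pred).length with hpA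
  set Q := xs.foldl (fun q s => min q (lcpLen x s)) x.length with hQ
  have hAg := takeWhile_good x xs m hm
  have hBg := foldMin_good x xs
  have hpq : pA = Q := goodCol_max_unique hAg.1 hAg.2 hBg.1 hBg.2
  have hfold : xs.foldl lcp2 x = x.take Q := by
    have := foldl_lcp2_take x xs x.length
    simpa using this
  have hQlen : Q ≤ x.length := hBg.1.1
  have hbal : balScan (x.take Q) 0 0 0 = bScanIdx x (List.range' 0 (x.take Q).length) 0 0 := by
    apply balScan_eq_bScanIdx
    intro j hj
    have hjx : j < x.length := by
      have := List.length_take_le Q x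
      omega
    rw [Nat.zero_add, List.getElem_take, List.getD_eq_getElem _ _ (by simpa using hjx)]
  have htake : (x.take Q).length = Q := by simp [hQlen]
  have hrange : List.range' 0 Q = List.range Q := List.range_eq_range'.symm
  have hTW : (List.range m).takeWhile pred = List.range pA :=
    prefix_range_eq m _ (List.takeWhile_prefix _)
  rw [hTW, hfold, hbal, htake, hrange, hpq]

-- ===== VERDICT (by name: the statement is the Claim_ definition above) =====
theorem common_prefix_suffix_len_spec : Claim_equal_common_prefix_suffix_len := by
  intro items _ hpre
  unfold Spec_common_prefix_suffix_len
  obtain ⟨x, xs, rfl⟩ := List.exists_cons_of_ne_nil hpre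
  rw [common_prefix_suffix_len, common_prefix_suffix_len_alt]
  have hmap1 : ((x :: xs).map String.toList).map (·.length)
      = (x :: xs).map (fun s => s.toList.length) := by
    simp [List.map_map, Function.comp]
  obtain ⟨m, hm⟩ : ∃ m, ((x :: xs).map (fun s => s.toList.length)).min? = some m := by
    rcases h : ((x :: xs).map (fun s => s.toList.length)).min? with _ | m
    · rw [List.min?_eq_none_iff] at h; simp at h
    · exact ⟨m, h⟩
  rw [hm]
  obtain ⟨-, hle⟩ := List.min?_eq_some_iff.mp hm
  have hx : m ≤ x.toList.length := hle _ (by simp)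
  have hxs : ∀ s ∈ xs.map String.toList, m ≤ s.length := by
    intro s hs
    obtain ⟨t, ht, rfl⟩ := List.mem_map.mp hs
    exact hle _ (List.mem_map.mpr ⟨t, by simp [ht]⟩)
  simp only [List.map_cons, List.tail_cons, List.headI_cons]
  refine Prod.ext ?_ ?_
  · -- prefix component
    show aLoopPre (x.toList :: xs.map String.toList) (List.range m) 0 0
        = balScan ((xs.map String.toList).foldl lcp2 x.toList) 0 0 0
    rw [aLoopPre_eq_bScanIdx]
    exact half_eq x.toList (xs.map String.toList) m (by rw [← hmap1] at hm; simpa using hm)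
  · -- suffix component
    show aLoopSuf (x.toList :: xs.map String.toList) (List.range' 1 m) 0 0
        = balScan (((xs.map String.toList).map List.reverse).foldl lcp2 x.toList.reverse) 0 0 0
    have hrange' : List.range' 1 m = (List.range m).map (· + 1) := by
      simp [List.range'_eq_map_range, Nat.add_comm]
    rw [hrange',
      aLoopSuf_eq_bScanIdx x.toList (xs.map String.toList) m hx hxs (List.range m)
        (fun i hi => List.mem_range.mp hi)]
    have hmrev : (((x.toList.reverse) :: (xs.map String.toList).map List.reverse).map (·.length)).min? = some m := by
      have : ((x.toList.reverse) :: (xs.map String.toList).map List.reverse).map (·.length)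
          = (x :: xs).map (fun s => s.toList.length) := by
        simp [List.map_map, Function.comp]
      rw [this, hm]
    exact half_eq x.toList.reverse ((xs.map String.toList).map List.reverse) m hmrev
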